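-- pv_equiv track=rewrite | github.com/nguyenhuuit/adventofcode | 2018/day2/part1.py | solution
-- ===== SOURCE A (Python) =====
-- def solution(input):
--   chuoi = input.split("\n")
--   s2 = [0] * len(chuoi)
--   s3 = [0] * len(chuoi)
--   for i in range(len(chuoi)):
--     for j in chuoi[i]:
--       if chuoi[i].count(j) == 2:
--         s2[i] = 1
--       if chuoi[i].count(j) == 3:
--         s3[i] = 1
--   return sum(s2) * sum(s3)
-- ===== SOURCE B (Python) =====
-- def solution(input):
--   twos = 0
--   threes = 0
--   for line in input.split("\n"):
--     rest = sorted(line)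
--     has2 = False
--     has3 = False
--     while rest:
--       c = rest[0]
--       k = 1
--       while k < len(rest) and rest[k] == c:
--         k += 1
--       if k == 2:
--         has2 = True
--       if k == 3:
--         has3 = True
--       rest = rest[k:]
--     if has2:
--       twos += 1
--     if has3:
--       threes += 1
--   return twos * threes
-- ===== Notes on version B (the rewrite author's own statement) =====
-- stated objective: faster
-- what changed: Replaces A's per-character line.count rescans (quadratic per line, plus two 0/1 flag arrays indexed by line number) with a sort of each line followed by a single run-length scan of consecutive equal characters, keeping two running counters.
import Mathlib
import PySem

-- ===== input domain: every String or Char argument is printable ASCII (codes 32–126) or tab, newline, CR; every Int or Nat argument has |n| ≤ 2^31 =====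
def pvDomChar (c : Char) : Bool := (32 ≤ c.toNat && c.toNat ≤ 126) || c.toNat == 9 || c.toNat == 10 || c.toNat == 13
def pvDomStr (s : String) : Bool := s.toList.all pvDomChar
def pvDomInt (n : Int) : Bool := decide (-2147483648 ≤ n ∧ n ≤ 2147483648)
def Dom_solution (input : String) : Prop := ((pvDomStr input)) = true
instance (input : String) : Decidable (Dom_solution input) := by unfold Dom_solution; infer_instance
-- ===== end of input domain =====

-- B replaces A's repeated per-character .count rescans by sorting each line and scanning
-- consecutive equal runs once (objective: faster).

-- ===== PORT A =====
def solution (input : String) : Int :=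
  let chuoi := PySem.Chars.splitOn input.toList ['\n']
  let s2 := List.replicate chuoi.length (0 : Int)
  let s3 := List.replicate chuoi.length (0 : Int)
  let st := (PySem.List.pyRange 0 (PySem.List.len chuoi)).foldl
    (fun (st : List Int × List Int) i =>
      (PySem.List.pyGetD chuoi i []).foldl
        (fun (st : List Int × List Int) j =>
          let st := if PySem.Chars.count (PySem.List.pyGetD chuoi i []) [j] == 2
                    then (PySem.List.pySetD st.1 i 1, st.2) else st
          if PySem.Chars.count (PySem.List.pyGetD chuoi i []) [j] == 3
          then (st.1, PySem.List.pySetD st.2 i 1) else st)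
        st)
    (s2, s3)
  st.1.sum * st.2.sum

-- ===== PORT B =====
-- the inner while loop of Source B: scan the sorted line's runs, flagging run lengths 2 and 3
def runFlags : List Char → Bool × Bool → Bool × Bool
  | [], f => f
  | c :: rest, f =>
      let k := (rest.takeWhile (fun x => x == c)).length + 1
      runFlags (rest.dropWhile (fun x => x == c)) (f.1 || (k == 2), f.2 || (k == 3))
termination_by xs _ => xs.length
decreasing_by
  simp only [List.length_cons]
  exact Nat.lt_succ_of_le (List.Sublist.length_le (List.dropWhile_sublist _))

def solution_alt (input : String) : Int :=
  let st := (PySem.Chars.splitOn input.toList ['\n']).foldl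
    (fun (acc : Int × Int) line =>
      let f := runFlags (PySem.List.sorted line (fun x => x) false) (false, false)
      ((if f.1 then acc.1 + 1 else acc.1), (if f.2 then acc.2 + 1 else acc.2)))
    (0, 0)
  st.1 * st.2

-- ===== PRECONDITION & SPEC =====
def Spec_solution (input : String) (out : Int) : Prop := out = solution_alt input
instance (input : String) (out : Int) : Decidable (Spec_solution input out) := by unfold Spec_solution; infer_instance

-- ===== CLAIM (what is proved, stated in full; the proofs are below) =====
def Claim_equal_solution : Prop := ∀ (input : String), Dom_solution input → Spec_solution input (solution input)

-- ===== LEMMAS AND PROOFS =====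

lemma count_go_singleton (c : Char) : ∀ (fuel : Nat) (l : List Char) (acc : Nat),
    l.length ≤ fuel → PySem.Chars.count.go [c] fuel l acc = acc + l.count c := by
  intro fuel
  induction fuel with
  | zero => intro l acc h; rw [List.length_eq_zero_iff.mp (Nat.le_zero.mp h)]; simp [PySem.Chars.count.go]
  | succ n ih =>
    intro l acc h
    cases l with
    | nil => simp [PySem.Chars.count.go]
    | cons x t =>
      simp only [PySem.Chars.count.go]
      by_cases hx : x = c
      · subst hx
        simp only [List.isPrefixOf, beq_self_eq_true, Bool.and_self, if_true]
        rw [List.length_cons] at h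
        rw [show List.drop (List.length [x]) (x :: t) = t by simp]
        rw [ih t (acc + 1) (by omega)]
        simp
        omega
      · have : [c].isPrefixOf (x :: t) = false := by
          simp [List.isPrefixOf]; exact fun hc => absurd hc.symm hx
        rw [this]
        simp only [Bool.false_eq_true, if_false]
        rw [List.length_cons] at h
        rw [ih t acc (by omega)]
        simp [hx]

lemma chars_count_singleton (l : List Char) (c : Char) :
    PySem.Chars.count l [c] = l.count c := by
  simp only [PySem.Chars.count, List.isEmpty_cons, Bool.false_eq_true, if_false]
  rw [count_go_singleton c l.length l 0 (le_refl _)]; omega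

def stepChar (line : List Char) (m : Nat) (st : List Int × List Int) (j : Char) : List Int × List Int :=
  let st1 := if line.count j == 2 then (st.1.set m 1, st.2) else st
  if line.count j == 3 then (st1.1, st1.2.set m 1) else st1

lemma innerA (line cs : List Char) (m : Nat) (s2 s3 : List Int) :
    cs.foldl (stepChar line m) (s2, s3)
    = ((if cs.any (fun j => line.count j == 2) then s2.set m 1 else s2),
       (if cs.any (fun j => line.count j == 3) then s3.set m 1 else s3)) := by
  induction cs generalizing s2 s3 with
  | nil => simp
  | cons c t ih =>
    simp only [List.foldl_cons, List.any_cons]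
    by_cases h2 : (line.count c == 2) = true <;> by_cases h3 : (line.count c == 3) = true <;>
      simp only [stepChar, h2, h3, if_true, if_false, Bool.false_eq_true, Bool.true_or,
        Bool.false_or] <;> rw [ih] <;> simp [List.set_set]

lemma port_step_eq (chuoi : List (List Char)) (m : Nat) :
    (fun (st : List Int × List Int) j =>
          let st := if PySem.Chars.count (PySem.List.pyGetD chuoi ((m : Nat) : Int) []) [j] == 2
                    then (PySem.List.pySetD st.1 ((m : Nat) : Int) 1, st.2) else st
          if PySem.Chars.count (PySem.List.pyGetD chuoi ((m : Nat) : Int) []) [j] == 3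
          then (st.1, PySem.List.pySetD st.2 ((m : Nat) : Int) 1) else st)
    = stepChar (chuoi.getD m []) m := by
  funext st j
  simp [stepChar, chars_count_singleton, PySem.List.pySetD_natCast, PySem.List.pyGetD_natCast]

def flagArr (g : Nat → Bool) (n m : Nat) : List Int :=
  (List.range n).map (fun k => if k < m ∧ g k = true then 1 else 0)

lemma flagArr_succ (g : Nat → Bool) (n m : Nat) (hm : m < n) :
    (if g m then (flagArr g n m).set m 1 else flagArr g n m) = flagArr g n (m + 1) := by
  by_cases h : g m = true
  · rw [if_pos h]
    apply List.ext_getElem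
    · simp [flagArr]
    · intro k hk hk'
      simp only [flagArr, List.length_set, List.length_map, List.length_range] at hk hk'
      simp only [flagArr, List.getElem_set, List.getElem_map, List.getElem_range]
      by_cases hkm : k = m
      · subst hkm; simp [h]
      · rw [if_neg (fun hh => hkm hh.symm)]
        have : k < m + 1 ∧ g k = true ↔ k < m ∧ g k = true := by
          constructor <;> rintro ⟨h1, h2⟩ <;> exact ⟨by omega, h2⟩
        rw [if_congr this rfl rfl]
  · rw [if_neg h]
    apply List.map_congr_left
    intro k hk
    simp only [List.mem_range] at hk
    have : k < m + 1 ∧ g k = true ↔ k < m ∧ g k = true := by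
      constructor <;> rintro ⟨h1, h2⟩
      · refine ⟨?_, h2⟩
        rcases Nat.lt_succ_iff_lt_or_eq.mp h1 with h' | h'
        · exact h'
        · subst h'; exact absurd h2 h
      · exact ⟨by omega, h2⟩
    rw [if_congr this rfl rfl]

lemma sum_flagArr (g : Nat → Bool) (n : Nat) :
    (flagArr g n n).sum = ((List.range n).countP g : Int) := by
  have h : flagArr g n n = (List.range n).map (fun k => if g k = true then 1 else 0) := by
    apply List.map_congr_left
    intro k hk
    simp only [List.mem_range] at hk
    by_cases h : g k = true <;> simp [h, hk]
  rw [h, PySem.List.sum_map_ite_one_zero]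

lemma countP_range_getD {α : Type} (l : List α) (p : α → Bool) (d : α) :
    (List.range l.length).countP (fun k => p (l.getD k d)) = l.countP p := by
  induction l using List.reverseRecOn with
  | nil => simp
  | append_singleton t x ih =>
    rw [List.length_append, List.length_cons, List.length_nil, Nat.zero_add, List.range_succ,
      List.countP_append, List.countP_append]
    have h1 : (List.range t.length).countP (fun k => p ((t ++ [x]).getD k d))
        = (List.range t.length).countP (fun k => p (t.getD k d)) := by
      apply List.countP_congr
      intro k hk
      simp only [List.mem_range] at hk
      rw [List.getD_append _ _ _ _ hk]
    rw [h1, ih]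
    simp [List.countP_cons]

-- the two per-line tests as a named predicate
def hasCnt (m : Nat) (l : List Char) : Bool := l.any (fun j => l.count j == m)

lemma innerA' (line : List Char) (m : Nat) (s2 s3 : List Int) :
    line.foldl (stepChar line m) (s2, s3)
    = ((if hasCnt 2 line then s2.set m 1 else s2),
       (if hasCnt 3 line then s3.set m 1 else s3)) := by
  rw [innerA]; rfl

lemma loopA (chuoi : List (List Char)) (m : Nat) (hm : m ≤ chuoi.length) :
    (PySem.List.pyRange 0 (m : Int)).foldl
      (fun (st : List Int × List Int) i =>
        (PySem.List.pyGetD chuoi i []).foldl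
          (fun (st : List Int × List Int) j =>
            let st := if PySem.Chars.count (PySem.List.pyGetD chuoi i []) [j] == 2
                      then (PySem.List.pySetD st.1 i 1, st.2) else st
            if PySem.Chars.count (PySem.List.pyGetD chuoi i []) [j] == 3
            then (st.1, PySem.List.pySetD st.2 i 1) else st)
          st)
      (List.replicate chuoi.length (0 : Int), List.replicate chuoi.length (0 : Int))
    = (flagArr (fun k => hasCnt 2 (chuoi.getD k [])) chuoi.length m,
       flagArr (fun k => hasCnt 3 (chuoi.getD k [])) chuoi.length m) := by
  induction m with
  | zero =>
    have h0 : PySem.List.pyRange 0 ((0 : Nat) : Int) = [] := by decide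
    rw [h0, List.foldl_nil]
    refine Prod.ext ?_ ?_ <;>
    · apply List.ext_getElem
      · simp [flagArr]
      · intro k hk hk'
        simp [flagArr]
  | succ p ih =>
    have hp : p ≤ chuoi.length := by omega
    have hcast : ((p : Nat) + 1 : Int) = ((p + 1 : Nat) : Int) := by push_cast; ring
    rw [← hcast, PySem.List.pyRange_one_succ_right (by positivity), List.foldl_append,
      ih hp, List.foldl_cons, List.foldl_nil, port_step_eq chuoi p,
      PySem.List.pyGetD_natCast, innerA',
      flagArr_succ (fun k => hasCnt 2 (chuoi.getD k [])) chuoi.length p (by omega),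
      flagArr_succ (fun k => hasCnt 3 (chuoi.getD k [])) chuoi.length p (by omega)]

lemma loopB (lines : List (List Char)) (a b : Int) :
    lines.foldl
      (fun (acc : Int × Int) line =>
        let f := runFlags (PySem.List.sorted line (fun x => x) false) (false, false)
        ((if f.1 then acc.1 + 1 else acc.1), (if f.2 then acc.2 + 1 else acc.2)))
      (a, b)
    = (a + (lines.countP (fun l => (runFlags (PySem.List.sorted l (fun x => x) false) (false, false)).1) : Int),
       b + (lines.countP (fun l => (runFlags (PySem.List.sorted l (fun x => x) false) (false, false)).2) : Int)) := by
  induction lines generalizing a b with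
  | nil => simp
  | cons l t ih =>
    simp only [List.foldl_cons, List.countP_cons]
    by_cases h1 : (runFlags (PySem.List.sorted l (fun x => x) false) (false, false)).1 = true <;>
      by_cases h2 : (runFlags (PySem.List.sorted l (fun x => x) false) (false, false)).2 = true <;>
      simp only [h1, h2, if_true, if_false, Bool.false_eq_true] <;> rw [ih] <;>
      simp [Prod.ext_iff] <;> omega

-- in a sorted list, the run at the head has the head's full count, and later elements
-- keep their counts in the tail past the run
lemma sorted_head_facts (c : Char) (rest : List Char) (h : (c :: rest).Pairwise (· ≤ ·)) :
    ((c :: rest).count c = (rest.takeWhile (fun x => x == c)).length + 1)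
    ∧ (∀ x ∈ rest.dropWhile (fun x => x == c), x ≠ c ∧
        (c :: rest).count x = (rest.dropWhile (fun x => x == c)).count x) := by
  have hle : ∀ x ∈ rest, c ≤ x := fun x hx => (List.pairwise_cons.mp h).1 x hx
  have hrest : rest.Pairwise (· ≤ ·) := (List.pairwise_cons.mp h).2
  have hsplit : rest = rest.takeWhile (fun x => x == c) ++ rest.dropWhile (fun x => x == c) :=
    (List.takeWhile_append_dropWhile).symm
  have htake : ∀ x ∈ rest.takeWhile (fun x => x == c), x = c := by
    intro x hx
    have := List.mem_takeWhile_imp hx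
    exact eq_of_beq this
  have hdropgt : ∀ x ∈ rest.dropWhile (fun x => x == c), c < x := by
    cases hd : rest.dropWhile (fun x => x == c) with
    | nil => intro x hx; simp at hx
    | cons y ys =>
      have hy : ¬(y == c) = true := by
        have := List.head?_dropWhile_not (fun x => x == c) rest
        rw [hd] at this; simpa using this
      have hymem : y ∈ rest := by
        have : y ∈ rest.dropWhile (fun x => x == c) := by rw [hd]; exact List.mem_cons_self
        exact List.dropWhile_sublist _ |>.mem this
      have hcy : c < y := lt_of_le_of_ne (hle y hymem) (by simpa using fun e => hy (by simp [e]))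
      have hdp : (y :: ys).Pairwise (· ≤ ·) := by
        rw [← hd]; exact hrest.sublist (List.dropWhile_sublist _)
      intro x hx
      rcases List.mem_cons.mp hx with rfl | hx'
      · exact hcy
      · exact lt_of_lt_of_le hcy ((List.pairwise_cons.mp hdp).1 x hx')
  constructor
  · rw [List.count_cons_self]
    conv_lhs => rw [hsplit]
    rw [List.count_append]
    have h1 : (rest.takeWhile (fun x => x == c)).count c
        = (rest.takeWhile (fun x => x == c)).length := by
      apply List.count_eq_length.mpr
      intro x hx; rw [htake x hx]
    have h2 : (rest.dropWhile (fun x => x == c)).count c = 0 := by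
      apply List.count_eq_zero.mpr
      intro hc
      exact absurd rfl (ne_of_gt (hdropgt c hc))
    omega
  · intro x hx
    have hxc : x ≠ c := fun e => absurd e.symm (ne_of_lt (hdropgt x hx))
    refine ⟨hxc, ?_⟩
    have hxc' : ¬(c == x) = true := by simpa using fun e => hxc e.symm
    rw [List.count_cons, if_neg hxc', Nat.add_zero]
    conv_lhs => rw [hsplit]
    rw [List.count_append]
    have : (rest.takeWhile (fun x => x == c)).count x = 0 := by
      apply List.count_eq_zero.mpr
      intro hc
      exact hxc (htake x hc)
    omega

lemma hasCnt_cons_sorted (m : Nat) (c : Char) (rest : List Char)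
    (h : (c :: rest).Pairwise (· ≤ ·)) :
    hasCnt m (c :: rest)
    = ((((rest.takeWhile (fun x => x == c)).length + 1) == m)
       || hasCnt m (rest.dropWhile (fun x => x == c))) := by
  obtain ⟨hcount, hdrop⟩ := sorted_head_facts c rest h
  have hsplit : rest = rest.takeWhile (fun x => x == c) ++ rest.dropWhile (fun x => x == c) :=
    (List.takeWhile_append_dropWhile).symm
  have htake : ∀ x ∈ rest.takeWhile (fun x => x == c), x = c := by
    intro x hx
    have := List.mem_takeWhile_imp hx
    exact eq_of_beq this
  rw [Bool.eq_iff_iff]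
  simp only [hasCnt, List.any_eq_true, Bool.or_eq_true, beq_iff_eq]
  constructor
  · rintro ⟨x, hx, hxm⟩
    rcases List.mem_cons.mp hx with rfl | hx'
    · left; omega
    · rw [hsplit] at hx'
      rcases List.mem_append.mp hx' with hx'' | hx''
      · left; rw [htake x hx''] at hxm; omega
      · right; exact ⟨x, hx'', by rw [← (hdrop x hx'').2]; exact hxm⟩
  · rintro (hrun | ⟨x, hx, hxm⟩)
    · exact ⟨c, List.mem_cons_self, by omega⟩
    · refine ⟨x, ?_, by rw [(hdrop x hx).2]; exact hxm⟩
      exact List.mem_cons_of_mem c ((List.dropWhile_sublist _).mem hx)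

lemma runFlags_eq (xs : List Char) (f : Bool × Bool) : xs.Pairwise (· ≤ ·) →
    runFlags xs f = (f.1 || hasCnt 2 xs, f.2 || hasCnt 3 xs) := by
  induction xs, f using runFlags.induct with
  | case1 f => intro h; simp [runFlags, hasCnt]
  | case2 c rest f k ih =>
    intro h
    rw [runFlags]
    have hrest : (rest.dropWhile (fun x => x == c)).Pairwise (· ≤ ·) :=
      ((List.pairwise_cons.mp h).2).sublist (List.dropWhile_sublist _)
    rw [ih hrest]
    rw [hasCnt_cons_sorted 2 c rest h, hasCnt_cons_sorted 3 c rest h]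
    have hk : k = (rest.takeWhile (fun x => x == c)).length + 1 := rfl
    simp only [hk]
    simp [Bool.or_assoc]

lemma hasCnt_sorted (m : Nat) (l : List Char) :
    hasCnt m (PySem.List.sorted l (fun x => x) false) = hasCnt m l := by
  have hperm := PySem.List.sorted_perm l (fun x => x) false
  rw [Bool.eq_iff_iff]
  simp only [hasCnt, List.any_eq_true]
  constructor <;> rintro ⟨x, hx, hxm⟩
  · exact ⟨x, hperm.mem_iff.mp hx, by rw [← hperm.count_eq]; exact hxm⟩
  · exact ⟨x, hperm.mem_iff.mpr hx, by rw [hperm.count_eq]; exact hxm⟩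

-- ===== VERDICT (by name: the statement is the Claim_ definition above) =====
theorem solution_spec : Claim_equal_solution := by
  intro input _
  show solution input = solution_alt input
  simp only [solution, solution_alt]
  rw [PySem.List.len_eq, loopA _ _ (le_refl _), loopB,
    sum_flagArr, sum_flagArr, countP_range_getD _ (hasCnt 2) [], countP_range_getD _ (hasCnt 3) []]
  have hb2 : ∀ (L : List (List Char)),
      L.countP (fun l => (runFlags (PySem.List.sorted l (fun x => x) false) (false, false)).1)
      = L.countP (hasCnt 2) := by
    intro L
    apply List.countP_congr
    intro l _
    rw [runFlags_eq _ _ (PySem.List.sorted_pairwise l (fun x => x))]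
    simp [hasCnt_sorted]
  have hb3 : ∀ (L : List (List Char)),
      L.countP (fun l => (runFlags (PySem.List.sorted l (fun x => x) false) (false, false)).2)
      = L.countP (hasCnt 3) := by
    intro L
    apply List.countP_congr
    intro l _
    rw [runFlags_eq _ _ (PySem.List.sorted_pairwise l (fun x => x))]
    simp [hasCnt_sorted]
  rw [hb2, hb3]
  ring
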